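-- pv_equiv track=rewrite | github.com/davidgbe/exfoliation | py_scripts/build_layered.py | multi_dim_iterate
-- ===== SOURCE A (Python) =====
-- from copy import deepcopy
--
-- def multi_dim_iterate(dims, base_specs=None, curr_iter=[]):
--     if len(dims) == len(curr_iter):
--         yield curr_iter
--     else:
--         if base_specs is None:
--             base_specs = [1] * len(dims)
--         curr_dim_idx = len(curr_iter)
--         for j in range(0, dims[curr_dim_idx]):
--             next_iter = deepcopy(curr_iter)
--             next_iter.append(base_specs[curr_dim_idx] * j)
--             for it in multi_dim_iterate(dims, base_specs, next_iter):
--                 yield it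
-- ===== SOURCE B (Python) =====
-- from itertools import product
--
--
-- def multi_dim_iterate(dims, base_specs=None, curr_iter=[]):
--     if base_specs is None:
--         base_specs = [1] * len(dims)
--     start = len(curr_iter)
--     rest = dims[start:]
--     if any(d <= 0 for d in rest):
--         return  # empty product: short-circuit before materializing any range
--     for combo in product(*(map(range, rest))):
--         yield list(curr_iter) + [base_specs[start + i] * v
--                                  for i, v in enumerate(combo)]
-- ===== Notes on version B (the rewrite author's own statement) =====
-- stated objective: idiomatic
-- what changed: Replaces the per-dimension recursive generator with deepcopy per step by a single itertools.product pass over the remaining dimension ranges, scaling each tuple with the base_specs suffix.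
import Mathlib
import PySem

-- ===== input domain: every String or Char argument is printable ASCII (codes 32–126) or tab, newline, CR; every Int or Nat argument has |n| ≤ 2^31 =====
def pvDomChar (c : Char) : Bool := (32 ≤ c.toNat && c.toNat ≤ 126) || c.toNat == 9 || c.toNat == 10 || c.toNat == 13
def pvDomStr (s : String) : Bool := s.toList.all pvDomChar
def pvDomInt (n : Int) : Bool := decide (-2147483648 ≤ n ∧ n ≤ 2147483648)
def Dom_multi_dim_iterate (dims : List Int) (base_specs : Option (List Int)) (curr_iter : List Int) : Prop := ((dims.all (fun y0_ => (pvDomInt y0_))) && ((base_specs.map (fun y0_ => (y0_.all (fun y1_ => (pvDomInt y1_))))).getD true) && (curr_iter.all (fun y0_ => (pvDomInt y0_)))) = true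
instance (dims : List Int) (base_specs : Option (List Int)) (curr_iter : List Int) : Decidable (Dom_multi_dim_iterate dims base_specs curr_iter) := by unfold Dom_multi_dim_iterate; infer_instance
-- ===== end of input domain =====

-- B replaces A's per-dimension recursion by one iterative Cartesian-product pass; equivalence
-- is about the list of yielded values of the generators (neither mutates its arguments).

-- ===== PORT A =====
-- Port of A: recursive generator, collected as the list of yields.
-- 'bs[k] * j' is ported with pyGetD (default 0): under Pre_ every access the loop executes is in range.
def multi_dim_iterate (dims : List Int) (base_specs : Option (List Int)) (curr_iter : List Int) : List (List Int) :=
  if dims.length = curr_iter.length then [curr_iter]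
  else
    let bs := base_specs.getD (List.replicate dims.length 1)
    match h : PySem.List.pyGet? dims (curr_iter.length : Int) with
    | none => []  -- Python raises IndexError on dims[curr_dim_idx] here; excluded by Pre_
    | some d =>
      (PySem.List.pyRange 0 d 1).flatMap
        (fun j => multi_dim_iterate dims (some bs)
          (curr_iter ++ [PySem.List.pyGetD bs (curr_iter.length : Int) 0 * j]))
termination_by dims.length - curr_iter.length
decreasing_by
  have hk : curr_iter.length < dims.length := by
    by_contra hge
    rw [PySem.List.pyGet?_natCast, List.getElem?_eq_none (by omega)] at h
    simp at h
  simp only [List.length_append, List.length_cons, List.length_nil]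
  omega

-- ===== PORT B =====
-- itertools.product(*(range(d) for d in ds)), lexicographic order
def pvProdRanges : List Int → List (List Int)
  | [] => [[]]
  | d :: ds => (PySem.List.pyRange 0 d 1).flatMap (fun v => (pvProdRanges ds).map (fun rest => v :: rest))

-- Port of B: resolve base_specs, take the dims[start:] suffix, short-circuit an empty product,
-- then one product pass, scaling each tuple.
def multi_dim_iterate_alt (dims : List Int) (base_specs : Option (List Int)) (curr_iter : List Int) : List (List Int) :=
  let bs := base_specs.getD (List.replicate dims.length 1)
  let start := curr_iter.length
  let rest := PySem.List.slice dims (some (start : Int)) none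
  if rest.any (fun d => decide (d ≤ 0)) then []
  else
    (pvProdRanges rest).map
      (fun combo => curr_iter ++ (PySem.List.enumerate combo 0).map
        (fun iv => PySem.List.pyGetD bs ((start : Int) + iv.1) 0 * iv.2))

-- ===== PRECONDITION & SPEC =====
-- Pre_ is exactly where Python A returns: curr_iter no longer than dims (else dims[len(curr_iter)]
-- raises IndexError), and an explicit base_specs too short for dims is never actually indexed,
-- i.e. every out-of-range level k is cut off by a non-positive dimension at or before k.
def Pre_multi_dim_iterate (dims : List Int) (base_specs : Option (List Int)) (curr_iter : List Int) : Prop :=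
  curr_iter.length ≤ dims.length ∧
  ∀ bs ∈ base_specs, ∀ k < dims.length, curr_iter.length ≤ k → bs.length ≤ k →
    dims.getD k 0 ≤ 0 ∨ ∃ j < k, curr_iter.length ≤ j ∧ dims.getD j 0 ≤ 0
instance (dims : List Int) (base_specs : Option (List Int)) (curr_iter : List Int) : Decidable (Pre_multi_dim_iterate dims base_specs curr_iter) := by unfold Pre_multi_dim_iterate; infer_instance

def pvWitness_multi_dim_iterate : List Int × Option (List Int) × List Int := ([2, 2], some [3, 5], [7])

def Spec_multi_dim_iterate (dims : List Int) (base_specs : Option (List Int)) (curr_iter : List Int) (out : List (List Int)) : Prop := out = multi_dim_iterate_alt dims base_specs curr_iter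
instance (dims : List Int) (base_specs : Option (List Int)) (curr_iter : List Int) (out : List (List Int)) : Decidable (Spec_multi_dim_iterate dims base_specs curr_iter out) := by unfold Spec_multi_dim_iterate; infer_instance

-- ===== CLAIM (what is proved, stated in full; the proofs are below) =====
def Claim_equal_multi_dim_iterate : Prop := ∀ (dims : List Int) (base_specs : Option (List Int)) (curr_iter : List Int), Dom_multi_dim_iterate dims base_specs curr_iter → Pre_multi_dim_iterate dims base_specs curr_iter → Spec_multi_dim_iterate dims base_specs curr_iter (multi_dim_iterate dims base_specs curr_iter)

-- ===== LEMMAS AND PROOFS =====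

-- shifting the enumerate start is the same as shifting the index offset
lemma pv_scale_shift (bs : List Int) (c : List Int) : ∀ (s t : Int),
    (PySem.List.enumerate c s).map (fun iv => PySem.List.pyGetD bs (t + iv.1) 0 * iv.2)
      = (PySem.List.enumerate c 0).map (fun iv => PySem.List.pyGetD bs ((t + s) + iv.1) 0 * iv.2) := by
  induction c with
  | nil => intro s t; simp [PySem.List.enumerate_nil]
  | cons x c ih =>
      intro s t
      rw [PySem.List.enumerate_cons, PySem.List.enumerate_cons]
      simp only [List.map_cons, Int.add_zero, Int.zero_add]
      rw [ih (s + 1) t, ih 1 (t + s)]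
      have h2 : t + (s + 1) = t + s + 1 := by ring
      rw [h2]

-- core invariant: A's recursion from any prefix equals the product pass over the remaining dims
lemma pv_core (dims : List Int) : ∀ (n : ℕ) (ci : List Int) (obs : Option (List Int)),
    ci.length + n = dims.length →
    multi_dim_iterate dims obs ci
      = (pvProdRanges (dims.drop ci.length)).map
          (fun combo => ci ++ (PySem.List.enumerate combo 0).map
            (fun iv => PySem.List.pyGetD (obs.getD (List.replicate dims.length 1)) ((ci.length : Int) + iv.1) 0 * iv.2)) := by
  intro n
  induction n with
  | zero =>
      intro ci obs hlen
      unfold multi_dim_iterate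
      simp only [Nat.add_zero] at hlen
      rw [if_pos hlen.symm]
      rw [hlen, List.drop_length]
      simp [pvProdRanges, PySem.List.enumerate_nil]
  | succ n ih =>
      intro ci obs hlen
      have hk : ci.length < dims.length := by omega
      unfold multi_dim_iterate
      rw [if_neg (by omega)]
      have hget : PySem.List.pyGet? dims (ci.length : Int) = some dims[ci.length] := by
        simp [PySem.List.pyGet?_natCast]
      split
      case _ hnone => rw [hget] at hnone; simp at hnone
      case _ d hd =>
        rw [hget] at hd
        obtain rfl : dims[ci.length] = d := Option.some.inj hd
        have hdrop : dims.drop ci.length = dims[ci.length] :: dims.drop (ci.length + 1) :=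
          List.drop_eq_getElem_cons hk
        rw [hdrop, pvProdRanges, List.map_flatMap]
        apply List.flatMap_congr
        intro v _
        set bs := obs.getD (List.replicate dims.length 1) with hbs
        rw [ih (ci ++ [PySem.List.pyGetD bs (ci.length : Int) 0 * v]) (some bs)
              (by simp; omega)]
        rw [List.map_map]
        simp only [List.length_append, List.length_cons, List.length_nil, Option.getD_some]
        apply List.map_congr_left
        intro combo _
        simp only [Function.comp]
        rw [PySem.List.enumerate_cons]
        simp only [List.map_cons, List.append_assoc, List.singleton_append,
          Nat.zero_add, Int.zero_add, Int.add_zero]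
        rw [pv_scale_shift bs combo 1 (ci.length : Int)]
        congr 2

-- a non-positive dimension empties the whole product
lemma pv_prod_nil : ∀ (rest : List Int), (∃ d ∈ rest, d ≤ 0) → pvProdRanges rest = [] := by
  intro rest
  induction rest with
  | nil => rintro ⟨d, hd, -⟩; cases hd
  | cons x xs ih =>
      rintro ⟨d, hd, hle⟩
      rcases List.mem_cons.mp hd with rfl | hmem
      · rw [pvProdRanges, PySem.List.pyRange_one_eq_nil hle]
        rfl
      · rw [pvProdRanges, ih ⟨d, hmem, hle⟩]
        simp

-- ===== VERDICT (by name: the statement is the Claim_ definition above) =====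
theorem multi_dim_iterate_spec : Claim_equal_multi_dim_iterate := by
  intro dims obs ci _ hpre
  unfold Spec_multi_dim_iterate
  have hle : ci.length ≤ dims.length := hpre.1
  rw [pv_core dims (dims.length - ci.length) ci obs (by omega)]
  simp only [multi_dim_iterate_alt, PySem.List.slice_from_natCast]
  by_cases hz : (dims.drop ci.length).any (fun d => decide (d ≤ 0))
  · rw [if_pos hz, pv_prod_nil _ (by simpa using hz)]
    simp
  · rw [if_neg hz]
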